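-- pv_equiv track=rewrite | github.com/NayMyatMin/Socrates | source/solver/backdoor_impl.py | __get_backdoor_indexes
-- ===== SOURCE A (Python) =====
-- def __get_backdoor_indexes(size, position, dataset):
--     if position < 0:
--         return None
--
--     if dataset == 'mnist':
--         num_chans, num_rows, num_cols = 1, 28, 28
--     elif dataset == 'cifar':
--         num_chans, num_rows, num_cols = 3, 32, 32
--
--     row_idx = int(position / num_cols)
--     col_idx = position - row_idx * num_cols
--
--     if row_idx + size[0] > num_rows or col_idx + size[1] > num_cols:
--         return None
--
--     indexes = []
--
--     for i in range(num_chans):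
--         tmp = position + i * num_rows * num_cols
--         for j in range(size[0]):
--             for k in range(size[1]):
--                 indexes.append(tmp + k)
--             tmp += num_cols
--
--     return indexes
-- ===== SOURCE B (Python) =====
-- def __get_backdoor_indexes(size, position, dataset):
--     if position < 0:
--         return None
--
--     if dataset == 'mnist':
--         num_chans, num_rows, num_cols = 1, 28, 28
--     elif dataset == 'cifar':
--         num_chans, num_rows, num_cols = 3, 32, 32
--
--     row_idx = position // num_cols
--     col_idx = position - row_idx * num_cols
--     if row_idx + size[0] > num_rows or col_idx + size[1] > num_cols:
--         return None
--
--     # flat closed-form enumeration: one loop over all patch cells, each flat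
--     # counter t is decoded arithmetically into (channel, row, col)
--     rows, cols = max(size[0], 0), max(size[1], 0)
--     block = rows * cols
--     indexes = []
--     for t in range(num_chans * block):
--         i, r = divmod(t, block)
--         j, k = divmod(r, cols)
--         indexes.append(position + i * num_rows * num_cols + j * num_cols + k)
--     return indexes
-- ===== Notes on version B (the rewrite author's own statement) =====
-- stated objective: alternative
-- what changed: Replaces the triple nested channel/row/col loop that mutates a running offset with a single flat loop over one counter t = 0..num_chans*rows*cols-1 that is decoded arithmetically by divmod into (channel, row, col) and mapped through a closed-form index formula.
import Mathlib
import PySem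

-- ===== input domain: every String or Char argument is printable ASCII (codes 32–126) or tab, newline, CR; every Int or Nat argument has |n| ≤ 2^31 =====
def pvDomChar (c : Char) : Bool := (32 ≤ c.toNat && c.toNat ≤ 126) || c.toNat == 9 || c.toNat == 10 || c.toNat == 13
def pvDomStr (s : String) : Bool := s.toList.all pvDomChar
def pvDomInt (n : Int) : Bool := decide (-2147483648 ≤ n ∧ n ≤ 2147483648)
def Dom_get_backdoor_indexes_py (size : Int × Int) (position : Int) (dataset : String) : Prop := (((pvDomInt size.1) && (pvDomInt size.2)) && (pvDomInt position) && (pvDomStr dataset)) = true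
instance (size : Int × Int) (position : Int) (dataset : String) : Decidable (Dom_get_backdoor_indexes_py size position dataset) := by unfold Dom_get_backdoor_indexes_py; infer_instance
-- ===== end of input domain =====

-- ===== PORT A =====
-- B replaces the triple nested loop with ONE flat loop over a counter t that is decoded
-- arithmetically (divmod) into (channel, row, col) (objective: alternative decomposition).
-- shared body of A after the dataset branch bound num_chans/num_rows/num_cols
def pvA_core (sz : Int × Int) (position : Int) (num_chans num_rows num_cols : Int) : Option (List Int) :=
  -- int(position / num_cols): position ≥ 0 and ≤ 2^31 here, so the float division is exactly floor division
  let row_idx := PySem.Int.floordiv position num_cols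
  let col_idx := position - row_idx * num_cols
  if row_idx + sz.1 > num_rows ∨ col_idx + sz.2 > num_cols then none
  else
    some ((PySem.List.pyRange 0 num_chans 1).foldl (fun acc i =>
      let tmp := position + i * num_rows * num_cols
      ((PySem.List.pyRange 0 sz.1 1).foldl
        (fun (st : List Int × Int) _j =>
          ((PySem.List.pyRange 0 sz.2 1).foldl (fun l k => l ++ [st.2 + k]) st.1,
           st.2 + num_cols))
        (acc, tmp)).1) [])

-- A raises NameError for datasets other than 'mnist'/'cifar' (when position ≥ 0); Pre_ excludes
-- those inputs and the port returns none there.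
def get_backdoor_indexes_py (size : Int × Int) (position : Int) (dataset : String) : Option (List Int) :=
  if position < 0 then none
  else if dataset = "mnist" then pvA_core size position 1 28 28
  else if dataset = "cifar" then pvA_core size position 3 32 32
  else none

-- ===== PORT B =====
-- shared body of B after the dataset branch
def pvB_core (sz : Int × Int) (position : Int) (num_chans num_rows num_cols : Int) : Option (List Int) :=
  let row_idx := PySem.Int.floordiv position num_cols
  let col_idx := position - row_idx * num_cols
  if row_idx + sz.1 > num_rows ∨ col_idx + sz.2 > num_cols then none
  else
    let rows := max sz.1 0
    let cols := max sz.2 0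
    let block := rows * cols
    some ((PySem.List.pyRange 0 (num_chans * block) 1).foldl (fun acc t =>
      acc ++ (match PySem.Int.divmod? t block with
      | none => []             -- unreachable: the loop only runs when block > 0
      | some (i, r) =>
        match PySem.Int.divmod? r cols with
        | none => []           -- unreachable likewise
        | some (j, k) =>
          [position + i * num_rows * num_cols + j * num_cols + k])) [])

def get_backdoor_indexes_py_alt (size : Int × Int) (position : Int) (dataset : String) : Option (List Int) :=
  if position < 0 then none
  else if dataset = "mnist" then pvB_core size position 1 28 28
  else if dataset = "cifar" then pvB_core size position 3 32 32
  else none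

-- ===== PRECONDITION & SPEC =====
-- Pre_ excludes only the inputs where A raises NameError: position ≥ 0 with a dataset other
-- than 'mnist'/'cifar' (num_chans/num_rows/num_cols are then unbound); B raises there too.
def Pre_get_backdoor_indexes_py (size : Int × Int) (position : Int) (dataset : String) : Prop :=
  position < 0 ∨ dataset = "mnist" ∨ dataset = "cifar"
instance (size : Int × Int) (position : Int) (dataset : String) : Decidable (Pre_get_backdoor_indexes_py size position dataset) := by unfold Pre_get_backdoor_indexes_py; infer_instance
def pvWitness_get_backdoor_indexes_py : (Int × Int) × Int × String := ((2, 2), 5, "mnist")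
def Spec_get_backdoor_indexes_py (size : Int × Int) (position : Int) (dataset : String) (out : Option (List Int)) : Prop := out = get_backdoor_indexes_py_alt size position dataset
instance (size : Int × Int) (position : Int) (dataset : String) (out : Option (List Int)) : Decidable (Spec_get_backdoor_indexes_py size position dataset out) := by unfold Spec_get_backdoor_indexes_py; infer_instance

-- ===== CLAIM (what is proved, stated in full; the proofs are below) =====
def Claim_equal_get_backdoor_indexes_py : Prop := ∀ (size : Int × Int) (position : Int) (dataset : String), Dom_get_backdoor_indexes_py size position dataset → Pre_get_backdoor_indexes_py size position dataset → Spec_get_backdoor_indexes_py size position dataset (get_backdoor_indexes_py size position dataset)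

-- ===== LEMMAS AND PROOFS =====

-- a nonnegative-bounded range is the range of the toNat cast
theorem pv_range_toNat (x : Int) :
    PySem.List.pyRange 0 x 1 = PySem.List.pyRange 0 ((x.toNat : Nat) : Int) 1 := by
  rw [PySem.List.pyRange_one, PySem.List.pyRange_one]
  simp
  rw [show (max x 0).toNat = x.toNat by omega]

-- splitting range(0, (a+1)*b) at a*b: the tail is range(0,b) shifted by a*b
theorem pv_range_shift (m : Int) (b : Nat) :
    PySem.List.pyRange m (m + (b : Int)) 1
      = (PySem.List.pyRange 0 (b : Int) 1).map (fun r => m + r) := by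
  rw [PySem.List.pyRange_one, PySem.List.pyRange_one]
  simp [List.map_map, Function.comp_def]

-- range(0, a*b) decomposed as a blocks of size b
theorem pv_range_mul (a b : Nat) :
    PySem.List.pyRange 0 ((a * b : Nat) : Int) 1
      = (PySem.List.pyRange 0 (a : Int) 1).flatMap
          (fun i => (PySem.List.pyRange 0 (b : Int) 1).map (fun r => i * (b : Int) + r)) := by
  induction a with
  | zero => simp [PySem.List.pyRange_zero_nat]
  | succ a ih =>
    have h2 : PySem.List.pyRange 0 (((a * b : Nat) : Int) + (b : Int)) 1
        = PySem.List.pyRange 0 ((a * b : Nat) : Int) 1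
          ++ PySem.List.pyRange ((a * b : Nat) : Int) (((a * b : Nat) : Int) + (b : Int)) 1 :=
      PySem.List.pyRange_one_append _ _ _ (Int.natCast_nonneg _)
        (le_add_of_nonneg_right (Int.natCast_nonneg _))
    have h3 : PySem.List.pyRange 0 (((a : Nat) : Int) + 1) 1
        = PySem.List.pyRange 0 ((a : Nat) : Int) 1 ++ [((a : Nat) : Int)] :=
      PySem.List.pyRange_one_succ_right (Int.natCast_nonneg _)
    rw [show ((a + 1) * b : Nat) = (a * b : Nat) + b from by ring, Nat.cast_add,
        h2, ih, pv_range_shift,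
        show ((a + 1 : Nat) : Int) = ((a : Nat) : Int) + 1 from by push_cast; ring, h3,
        List.flatMap_append]
    simp

-- divmod decodes a block-encoded counter
theorem pv_divmod_decode (i r b : Int) (hb : 0 < b) (hr0 : 0 ≤ r) (hrb : r < b) :
    PySem.Int.divmod? (i * b + r) b = some (i, r) := by
  have hbne : b ≠ 0 := by omega
  have hd : PySem.Int.floordiv (i * b + r) b = i := by
    rw [PySem.Int.floordiv_eq_iff_of_pos hb]
    constructor <;> nlinarith
  have hm := PySem.Int.floordiv_mul_add_mod (i * b + r) b
  rw [hd] at hm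
  have hmr : PySem.Int.mod (i * b + r) b = r := by linarith
  simp [PySem.Int.divmod?, hbne]
  constructor
  · simpa [PySem.Int.floordiv] using hd
  · simpa [PySem.Int.mod] using hmr

-- ===== A-side: the triple nested loop as nested flatMaps =====

theorem pv_jloop (n c t : Int) (acc : List Int) (m : Nat) :
    (PySem.List.pyRange 0 (m : Int) 1).foldl
        (fun (st : List Int × Int) _j =>
          ((PySem.List.pyRange 0 n 1).foldl (fun l k => l ++ [st.2 + k]) st.1, st.2 + c))
        (acc, t)
      = (acc ++ (PySem.List.pyRange 0 (m : Int) 1).flatMap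
            (fun j => (PySem.List.pyRange 0 n 1).map (fun k => t + j * c + k)),
         t + m * c) := by
  induction m with
  | zero => simp
  | succ m ih =>
    have hsplit : PySem.List.pyRange 0 ((m : Int) + 1) 1
        = PySem.List.pyRange 0 (m : Int) 1 ++ [(m : Int)] :=
      PySem.List.pyRange_one_succ_right (by positivity)
    push_cast
    rw [hsplit, List.foldl_append, List.flatMap_append, ih]
    simp
    refine ⟨?_, by ring⟩
    exact List.map_eq_flatMap.symm

-- one channel of A's loop equals the base block shifted by the channel offset
theorem pv_channel (p c off : Int) (s1 n : Int) (acc : List Int) :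
    ((PySem.List.pyRange 0 s1 1).foldl
        (fun (st : List Int × Int) _j =>
          ((PySem.List.pyRange 0 n 1).foldl (fun l k => l ++ [st.2 + k]) st.1, st.2 + c))
        (acc, p + off)).1
      = acc ++ ((PySem.List.pyRange 0 s1 1).flatMap
            (fun j => (PySem.List.pyRange 0 n 1).map (fun k => p + j * c + k))).map
          (fun b => b + off) := by
  by_cases hs : s1 ≤ 0
  · rw [PySem.List.pyRange_one_eq_nil hs]; simp
  · obtain ⟨m, hm⟩ : ∃ m : Nat, s1 = (m : Int) := ⟨s1.toNat, by omega⟩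
    subst hm
    rw [pv_jloop]
    simp [List.map_flatMap]
    congr 1
    funext j
    simp only [Function.comp_def]
    congr 1
    funext k
    ring

-- the whole channel loop of A as nested flatMaps
theorem pv_outer (p c R : Int) (s1 n : Int) (nc : Int) :
    (PySem.List.pyRange 0 nc 1).foldl (fun acc i =>
        ((PySem.List.pyRange 0 s1 1).foldl
          (fun (st : List Int × Int) _j =>
            ((PySem.List.pyRange 0 n 1).foldl (fun l k => l ++ [st.2 + k]) st.1, st.2 + c))
          (acc, p + i * R * c)).1) []
      = (PySem.List.pyRange 0 nc 1).flatMap (fun i =>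
          ((PySem.List.pyRange 0 s1 1).flatMap
            (fun j => (PySem.List.pyRange 0 n 1).map (fun k => p + j * c + k))).map
          (fun b => b + i * R * c)) := by
  have hstep : (fun (acc : List Int) (i : Int) =>
      ((PySem.List.pyRange 0 s1 1).foldl
          (fun (st : List Int × Int) _j =>
            ((PySem.List.pyRange 0 n 1).foldl (fun l k => l ++ [st.2 + k]) st.1, st.2 + c))
          (acc, p + i * R * c)).1)
      = fun acc i => acc ++ ((PySem.List.pyRange 0 s1 1).flatMap
            (fun j => (PySem.List.pyRange 0 n 1).map (fun k => p + j * c + k))).map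
          (fun b => b + i * R * c) := by
    funext acc i
    exact pv_channel p c (i * R * c) s1 n acc
  rw [hstep, PySem.List.foldl_append_eq_flatMap]
  simp

-- ===== B-side: the flat decoded loop as the same nested flatMaps =====

theorem pv_flat (p c R nc : Int) (rows cols : Nat) :
    (PySem.List.pyRange 0 (nc * ((rows : Int) * (cols : Int))) 1).foldl (fun acc t =>
      acc ++ (match PySem.Int.divmod? t ((rows : Int) * (cols : Int)) with
      | none => []
      | some (i, r) =>
        match PySem.Int.divmod? r ((cols : Nat) : Int) with
        | none => []
        | some (j, k) => [p + i * R * c + j * c + k])) []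
      = (PySem.List.pyRange 0 nc 1).flatMap (fun i =>
          (PySem.List.pyRange 0 ((rows : Nat) : Int) 1).flatMap (fun j =>
            (PySem.List.pyRange 0 ((cols : Nat) : Int) 1).map (fun k =>
              p + i * R * c + j * c + k))) := by
  rw [PySem.List.foldl_append_eq_flatMap]
  by_cases hnc : nc ≤ 0
  · rw [PySem.List.pyRange_one_eq_nil hnc,
        PySem.List.pyRange_one_eq_nil (b := nc * ((rows : Int) * (cols : Int)))
          (by nlinarith [mul_nonneg (Int.natCast_nonneg rows) (Int.natCast_nonneg cols)])]
    rfl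
  · obtain ⟨a, ha⟩ : ∃ a : Nat, nc = (a : Int) := ⟨nc.toNat, by omega⟩
    subst ha
    rw [show ((a : Int)) * ((rows : Int) * (cols : Int)) = ((a * (rows * cols) : Nat) : Int)
          from by push_cast; ring,
        pv_range_mul a (rows * cols), List.flatMap_assoc]
    refine List.flatMap_congr (fun i _hi => ?_)
    rw [List.flatMap_map, pv_range_mul rows cols, List.flatMap_assoc]
    refine List.flatMap_congr (fun j hj => ?_)
    rw [List.flatMap_map]
    have hj' := (PySem.List.mem_pyRange_one.mp hj)
    -- pointwise: each decoded counter yields exactly the intended singleton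
    have hmap : ∀ k ∈ PySem.List.pyRange 0 ((cols : Nat) : Int) 1,
        (fun r => (match PySem.Int.divmod? (i * ((rows * cols : Nat) : Int) + r)
              ((rows : Int) * (cols : Int)) with
          | none => ([] : List Int)
          | some (i', r') =>
            match PySem.Int.divmod? r' ((cols : Nat) : Int) with
            | none => []
            | some (j', k') => [p + i' * R * c + j' * c + k'])) (j * ((cols : Nat) : Int) + k)
          = [p + i * R * c + j * c + k] := by
      intro k hk
      have hk' := PySem.List.mem_pyRange_one.mp hk
      have hcols : (0 : Int) < ((cols : Nat) : Int) := by omega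
      have hrows : (0 : Int) < ((rows : Nat) : Int) := by
        rcases hj' with ⟨h1, h2⟩; omega
      have hblock : (0 : Int) < (rows : Int) * (cols : Int) := by positivity
      have hr0 : (0 : Int) ≤ j * ((cols : Nat) : Int) + k := by
        rcases hj' with ⟨h1, _⟩; rcases hk' with ⟨h3, _⟩; positivity
      have hrb : j * ((cols : Nat) : Int) + k < (rows : Int) * (cols : Int) := by
        rcases hj' with ⟨_, h2⟩; rcases hk' with ⟨_, h4⟩; nlinarith
      have e1 : PySem.Int.divmod? (i * ((rows * cols : Nat) : Int)
            + (j * ((cols : Nat) : Int) + k)) ((rows : Int) * (cols : Int))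
          = some (i, j * ((cols : Nat) : Int) + k) := by
        rw [show ((rows * cols : Nat) : Int) = (rows : Int) * (cols : Int) from by push_cast; ring]
        exact pv_divmod_decode _ _ _ hblock hr0 hrb
      have e2 : PySem.Int.divmod? (j * ((cols : Nat) : Int) + k) ((cols : Nat) : Int)
          = some (j, k) := by
        rcases hk' with ⟨h3, h4⟩
        exact pv_divmod_decode _ _ _ hcols h3 h4
      simp only [e1, e2]
    calc (PySem.List.pyRange 0 ((cols : Nat) : Int) 1).flatMap
            (fun k => (fun r => (match PySem.Int.divmod? (i * ((rows * cols : Nat) : Int) + r)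
                ((rows : Int) * (cols : Int)) with
              | none => ([] : List Int)
              | some (i', r') =>
                match PySem.Int.divmod? r' ((cols : Nat) : Int) with
                | none => []
                | some (j', k') => [p + i' * R * c + j' * c + k'])) (j * ((cols : Nat) : Int) + k))
        = (PySem.List.pyRange 0 ((cols : Nat) : Int) 1).flatMap
            (fun k => [p + i * R * c + j * c + k]) := List.flatMap_congr hmap
      _ = (PySem.List.pyRange 0 ((cols : Nat) : Int) 1).map
            (fun k => p + i * R * c + j * c + k) := by
          rw [List.map_eq_flatMap]

-- the two shared bodies agree whenever num_cols ≠ 0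
theorem pv_core (size : Int × Int) (position : Int) (nc R c : Int) :
    pvA_core size position nc R c = pvB_core size position nc R c := by
  unfold pvA_core pvB_core
  dsimp only
  split_ifs with h
  · rfl
  · refine congrArg some ?_
    rw [pv_outer]
    rw [show max size.1 0 = ((size.1.toNat : Nat) : Int) from by omega,
        show max size.2 0 = ((size.2.toNat : Nat) : Int) from by omega,
        pv_flat position c R nc size.1.toNat size.2.toNat,
        pv_range_toNat size.1, pv_range_toNat size.2]
    refine List.flatMap_congr (fun i _ => ?_)
    rw [List.map_flatMap]
    refine List.flatMap_congr (fun j _ => ?_)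
    rw [List.map_map]
    refine List.map_congr_left (fun k _ => ?_)
    simp only [Function.comp_def]
    ring

-- ===== VERDICT (by name: the statement is the Claim_ definition above) =====
theorem get_backdoor_indexes_py_spec : Claim_equal_get_backdoor_indexes_py := by
  intro size position dataset _hdom hpre
  unfold Spec_get_backdoor_indexes_py get_backdoor_indexes_py get_backdoor_indexes_py_alt
  by_cases hp : position < 0
  · simp [hp]
  · rw [if_neg hp, if_neg hp]
    rcases hpre with hpre | hm | hc
    · exact absurd hpre hp
    · subst hm
      show pvA_core size position 1 28 28 = pvB_core size position 1 28 28
      exact pv_core size position 1 28 28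
    · subst hc
      show pvA_core size position 3 32 32 = pvB_core size position 3 32 32
      exact pv_core size position 3 32 32
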